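-- pv_equiv track=rewrite | github.com/albes/cryton | run_tests.py | parse_valgrind_leaks
-- ===== SOURCE A (Python) =====
-- def parse_valgrind_leaks(stderr_output):
--     leaks = {
--         "definitely lost": 0,
--         "indirectly lost": 0,
--         "possibly lost": 0,
--         "still reachable": 0,
--     }
--
--     for line in stderr_output.splitlines():
--         for key in leaks:
--             if key in line:
--                 parts = line.split(":")
--                 if len(parts) > 1:
--                     value_str = parts[1].strip().split(" ")[0].replace(",", "")
--                     try:
--                         leaks[key] = int(value_str)
--                     except ValueError:
--                         pass
--     return leaks
-- ===== SOURCE B (Python) =====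
-- _KEYS = ("definitely lost", "indirectly lost", "possibly lost", "still reachable")
--
-- def _leak_value(line):
--     parts = line.split(":")
--     if len(parts) > 1:
--         token = parts[1].strip().split(" ")[0].replace(",", "")
--         try:
--             return int(token)
--         except ValueError:
--             return None
--     return None
--
-- def parse_valgrind_leaks(stderr_output):
--     rlines = stderr_output.splitlines()[::-1]
--     result = {}
--     for key in _KEYS:
--         result[key] = 0
--         for line in rlines:
--             if key in line:
--                 v = _leak_value(line)
--                 if v is not None:
--                     result[key] = v
--                     break
--     return result
-- ===== Notes on version B (the rewrite author's own statement) =====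
-- stated objective: alternative
-- what changed: Replaces A's nested line/key loop that mutates a dict (last successful parse wins) with a per-key backward scan over the reversed lines that returns the first successfully parsed value and exits early, building the result dict in one pass per key.
import Mathlib
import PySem

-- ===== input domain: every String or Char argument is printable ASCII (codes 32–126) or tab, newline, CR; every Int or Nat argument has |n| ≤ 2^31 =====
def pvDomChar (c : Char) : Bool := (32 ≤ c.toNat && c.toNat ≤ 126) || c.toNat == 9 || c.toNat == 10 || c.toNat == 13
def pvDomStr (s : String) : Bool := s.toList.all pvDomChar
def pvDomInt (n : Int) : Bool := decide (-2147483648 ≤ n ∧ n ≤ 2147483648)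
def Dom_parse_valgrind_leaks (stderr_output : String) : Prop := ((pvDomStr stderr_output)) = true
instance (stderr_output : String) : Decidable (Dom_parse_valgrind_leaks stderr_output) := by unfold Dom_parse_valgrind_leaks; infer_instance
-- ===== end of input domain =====

-- B replaces A's mutating nested line/key loop by a per-key backward search with early exit (alternative decomposition, same cost).


-- ===== PORT A =====
def parse_valgrind_leaks (stderr_output : String) : List (String × Int) :=
  let init : PySem.Dict String Int :=
    ((((PySem.Dict.empty.insert "definitely lost" 0).insert "indirectly lost" 0).insert
        "possibly lost" 0).insert "still reachable" 0)
  let final :=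
    (PySem.Str.splitlines stderr_output).foldl (fun leaks line =>
      leaks.keys.foldl (fun lk key =>
        if PySem.Str.isIn key line then
          let parts := (PySem.Str.split? line ":").getD []
          if parts.length > 1 then
            let value_str := PySem.Str.replace
              (((PySem.Str.split? (PySem.Str.strip (parts.getD 1 "")) " ").getD []).getD 0 "") "," ""
            match PySem.Int.ofStr? value_str with
            | some v => lk.insert key v
            | none => lk
          else lk
        else lk) leaks) init
  final.items

-- ===== PORT B =====
-- helper of Source B: _leak_value
def pvLeakValue (line : String) : Option Int :=
  let parts := (PySem.Str.split? line ":").getD []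
  if parts.length > 1 then
    PySem.Int.ofStr? (PySem.Str.replace
      (((PySem.Str.split? (PySem.Str.strip (parts.getD 1 "")) " ").getD []).getD 0 "") "," "")
  else none

-- Source B's inner reverse scan with break, as the obvious structural recursion (default 0)
def pvLastVal (key : String) (rlines : List String) : Int :=
  match rlines with
  | [] => 0
  | line :: rest =>
    if PySem.Str.isIn key line then
      match pvLeakValue line with
      | some v => v
      | none => pvLastVal key rest
    else pvLastVal key rest

def parse_valgrind_leaks_alt (stderr_output : String) : List (String × Int) :=
  let rlines := (PySem.Str.splitlines stderr_output).reverse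
  ["definitely lost", "indirectly lost", "possibly lost", "still reachable"].map
    (fun key => (key, pvLastVal key rlines))

-- ===== PRECONDITION & SPEC =====
def Spec_parse_valgrind_leaks (stderr_output : String) (out : List (String × Int)) : Prop := out = parse_valgrind_leaks_alt stderr_output
instance (stderr_output : String) (out : List (String × Int)) : Decidable (Spec_parse_valgrind_leaks stderr_output out) := by unfold Spec_parse_valgrind_leaks; infer_instance

-- ===== CLAIM (what is proved, stated in full; the proofs are below) =====
def Claim_equal_parse_valgrind_leaks : Prop := ∀ (stderr_output : String), Dom_parse_valgrind_leaks stderr_output → Spec_parse_valgrind_leaks stderr_output (parse_valgrind_leaks stderr_output)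

-- ===== LEMMAS AND PROOFS =====

-- the concrete 4-key dict with symbolic values
def pvMk4 (a b c d : Int) : PySem.Dict String Int :=
  ((((PySem.Dict.empty.insert "definitely lost" a).insert "indirectly lost" b).insert
      "possibly lost" c).insert "still reachable" d)

-- A's per-key update for one line
def pvUpd (key : String) (x : Int) (line : String) : Int :=
  if PySem.Str.isIn key line then
    match pvLeakValue line with
    | some v => v
    | none => x
  else x

theorem pvIns1 (a b c d v : Int) : (pvMk4 a b c d).insert "definitely lost" v = pvMk4 v b c d := rfl
theorem pvIns2 (a b c d v : Int) : (pvMk4 a b c d).insert "indirectly lost" v = pvMk4 a v c d := rfl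
theorem pvIns3 (a b c d v : Int) : (pvMk4 a b c d).insert "possibly lost" v = pvMk4 a b v d := rfl
theorem pvIns4 (a b c d v : Int) : (pvMk4 a b c d).insert "still reachable" v = pvMk4 a b c v := rfl

theorem pvStep_mk4 (a b c d : Int) (line : String) :
    (pvMk4 a b c d).keys.foldl (fun lk key =>
        if PySem.Str.isIn key line then
          let parts := (PySem.Str.split? line ":").getD []
          if parts.length > 1 then
            let value_str := PySem.Str.replace
              (((PySem.Str.split? (PySem.Str.strip (parts.getD 1 "")) " ").getD []).getD 0 "") "," ""
            match PySem.Int.ofStr? value_str with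
            | some v => lk.insert key v
            | none => lk
          else lk
        else lk) (pvMk4 a b c d)
      = pvMk4 (pvUpd "definitely lost" a line) (pvUpd "indirectly lost" b line)
              (pvUpd "possibly lost" c line) (pvUpd "still reachable" d line) := by
  have hk : (pvMk4 a b c d).keys
      = ["definitely lost", "indirectly lost", "possibly lost", "still reachable"] := rfl
  rw [hk]
  simp only [List.foldl_cons, List.foldl_nil]
  have hbody : ∀ (lk : PySem.Dict String Int) (key : String),
      (if PySem.Str.isIn key line then
          let parts := (PySem.Str.split? line ":").getD []
          if parts.length > 1 then
            let value_str := PySem.Str.replace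
              (((PySem.Str.split? (PySem.Str.strip (parts.getD 1 "")) " ").getD []).getD 0 "") "," ""
            match PySem.Int.ofStr? value_str with
            | some v => lk.insert key v
            | none => lk
          else lk
        else lk)
      = (if PySem.Str.isIn key line then
            match pvLeakValue line with
            | some v => lk.insert key v
            | none => lk
          else lk) := by
    intro lk key
    unfold pvLeakValue
    by_cases hin : PySem.Str.isIn key line
    · simp only [hin, if_true]
      by_cases hp : ((PySem.Str.split? line ":").getD []).length > 1
      · simp only [hp, if_true]
      · simp only [hp, if_false]
    · simp only [hin, Bool.false_eq_true, if_false]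
  simp only [hbody]
  rcases hv : pvLeakValue line with _ | v <;>
    by_cases h1 : PySem.Str.isIn "definitely lost" line <;>
    by_cases h2 : PySem.Str.isIn "indirectly lost" line <;>
    by_cases h3 : PySem.Str.isIn "possibly lost" line <;>
    by_cases h4 : PySem.Str.isIn "still reachable" line <;>
    simp only [pvUpd, hv, h1, h2, h3, h4, if_true, Bool.false_eq_true, if_false,
      pvIns1, pvIns2, pvIns3, pvIns4]

theorem pvFoldA (lines : List String) (a b c d : Int) :
    lines.foldl (fun leaks line =>
      leaks.keys.foldl (fun lk key =>
        if PySem.Str.isIn key line then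
          let parts := (PySem.Str.split? line ":").getD []
          if parts.length > 1 then
            let value_str := PySem.Str.replace
              (((PySem.Str.split? (PySem.Str.strip (parts.getD 1 "")) " ").getD []).getD 0 "") "," ""
            match PySem.Int.ofStr? value_str with
            | some v => lk.insert key v
            | none => lk
          else lk
        else lk) leaks) (pvMk4 a b c d)
      = pvMk4 (lines.foldl (pvUpd "definitely lost") a) (lines.foldl (pvUpd "indirectly lost") b)
              (lines.foldl (pvUpd "possibly lost") c) (lines.foldl (pvUpd "still reachable") d) := by
  induction lines generalizing a b c d with
  | nil => rfl
  | cons l t ih => simp only [List.foldl_cons, pvStep_mk4, ih]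

-- Source B's default-x variant of the reverse scan
def pvLastValD (key : String) (rlines : List String) (x : Int) : Int :=
  match rlines with
  | [] => x
  | line :: rest =>
    if PySem.Str.isIn key line then
      match pvLeakValue line with
      | some v => v
      | none => pvLastValD key rest x
    else pvLastValD key rest x

theorem pvLastVal_eq_foldl (key : String) (lines : List String) (x : Int) :
    pvLastValD key lines.reverse x = lines.foldl (pvUpd key) x := by
  induction lines using List.reverseRecOn with
  | nil => rfl
  | append_singleton t l ih =>
    simp only [List.reverse_append, List.reverse_singleton, List.singleton_append,
      List.foldl_append, List.foldl_cons, List.foldl_nil, pvLastValD, pvUpd]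
    split_ifs with h
    · cases pvLeakValue l <;> simp [ih]
    · exact ih

theorem pvLastVal_eq_D (key : String) (rlines : List String) :
    pvLastVal key rlines = pvLastValD key rlines 0 := by
  induction rlines with
  | nil => rfl
  | cons l t ih =>
    simp only [pvLastVal, pvLastValD]
    split_ifs with h
    · cases pvLeakValue l <;> simp [ih]
    · exact ih

-- ===== VERDICT (by name: the statement is the Claim_ definition above) =====
theorem parse_valgrind_leaks_spec : Claim_equal_parse_valgrind_leaks := by
  intro s _
  unfold Spec_parse_valgrind_leaks parse_valgrind_leaks parse_valgrind_leaks_alt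
  show ((PySem.Str.splitlines s).foldl _ (pvMk4 0 0 0 0)).items = _
  rw [pvFoldA]
  simp only [List.map_cons, List.map_nil, pvLastVal_eq_D,
    pvLastVal_eq_foldl]
  rfl
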